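-- pv_equiv track=rewrite | github.com/rmoskwa/githubSignatureParser | src/comprehensive_parser.py | _extract_help_text
-- ===== SOURCE A (Python) =====
-- def _extract_help_text(function_body: str) -> str:
--     """Extract the help comment block after function definition"""
--     lines = function_body.split('\n')
--     help_lines = []
--     in_help = False
--
--     for line in lines[1:]:  # Skip function definition line
--         stripped = line.strip()
--         if stripped.startswith('%'):
--             in_help = True
--             help_lines.append(stripped[1:].strip())
--         elif in_help and not stripped.startswith('%'):
--             break  # End of help block
--
--     return '\n'.join(help_lines)
-- ===== SOURCE B (Python) =====
-- def _extract_help_text(function_body: str) -> str: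
--     """Extract the help comment block after function definition"""
--     stripped = [line.strip() for line in function_body.split('\n')[1:]]
--     rest = stripped
--     while rest and not rest[0].startswith('%'):
--         rest = rest[1:]
--     block = []
--     while rest and rest[0].startswith('%'):
--         block.append(rest[0][1:].strip())
--         rest = rest[1:]
--     return '\n'.join(block)
-- ===== Notes on version B (the rewrite author's own statement) =====
-- stated objective: idiomatic
-- what changed: Replaces the in_help flag state machine with a break by a drop-while/take-while decomposition over lines pre-stripped in one up-front pass.
import Mathlib
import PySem

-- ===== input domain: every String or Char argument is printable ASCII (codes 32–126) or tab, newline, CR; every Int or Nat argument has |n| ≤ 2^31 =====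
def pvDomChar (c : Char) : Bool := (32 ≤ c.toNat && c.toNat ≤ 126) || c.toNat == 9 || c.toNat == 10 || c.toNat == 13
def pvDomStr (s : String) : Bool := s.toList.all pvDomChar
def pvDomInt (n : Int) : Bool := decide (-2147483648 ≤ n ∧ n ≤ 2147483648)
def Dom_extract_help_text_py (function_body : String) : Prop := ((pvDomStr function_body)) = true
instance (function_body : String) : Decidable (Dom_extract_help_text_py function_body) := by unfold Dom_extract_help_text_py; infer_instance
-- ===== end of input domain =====

-- B replaces A's in_help flag state machine (with break) by a drop-while/take-while
-- decomposition over lines pre-stripped once up front (objective: idiomatic).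


-- ===== PORT A =====
-- A's loop: in_help flag; '%' line appends stripped[1:].strip(); a non-'%' line after
-- in_help breaks (recursion returns [], capturing the break).
def pvLoopA : List String → Bool → List String
  | [], _ => []
  | l :: ls, inh =>
    let stripped := PySem.Str.strip l
    if PySem.Str.startswith stripped "%" then
      PySem.Str.strip (PySem.Str.slice stripped (some 1) none) :: pvLoopA ls true
    else if inh then [] else pvLoopA ls inh

def extract_help_text_py (function_body : String) : String :=
  let lines := (PySem.Str.split? function_body "\n").getD []
  PySem.Str.join "\n" (pvLoopA (PySem.List.slice lines (some 1) none) false)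

-- ===== PORT B =====
-- Source B first while loop: drop leading lines not starting with '%'
def pvAltDrop : List String → List String
  | [] => []
  | s :: ls => if PySem.Str.startswith s "%" then s :: ls else pvAltDrop ls

-- Source B second while loop: take the contiguous '%' block, mapping to s[1:].strip()
def pvAltTake : List String → List String
  | [] => []
  | s :: ls =>
    if PySem.Str.startswith s "%" then
      PySem.Str.strip (PySem.Str.slice s (some 1) none) :: pvAltTake ls
    else []

def extract_help_text_py_alt (function_body : String) : String :=
  let stripped := (PySem.List.slice ((PySem.Str.split? function_body "\n").getD []) (some 1) none).map PySem.Str.strip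
  PySem.Str.join "\n" (pvAltTake (pvAltDrop stripped))

-- ===== PRECONDITION & SPEC =====
def Spec_extract_help_text_py (function_body : String) (out : String) : Prop := out = extract_help_text_py_alt function_body
instance (function_body : String) (out : String) : Decidable (Spec_extract_help_text_py function_body out) := by unfold Spec_extract_help_text_py; infer_instance

-- ===== CLAIM (what is proved, stated in full; the proofs are below) =====
def Claim_equal_extract_help_text_py : Prop := ∀ (function_body : String), Dom_extract_help_text_py function_body → Spec_extract_help_text_py function_body (extract_help_text_py function_body)

-- ===== LEMMAS AND PROOFS =====
theorem pvLoopA_true (ls : List String) :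
    pvLoopA ls true = pvAltTake (ls.map PySem.Str.strip) := by
  induction ls with
  | nil => rfl
  | cons l ls ih =>
    simp only [pvLoopA, pvAltTake, List.map]
    split_ifs with h <;> simp [ih]

theorem pvLoopA_false (ls : List String) :
    pvLoopA ls false = pvAltTake (pvAltDrop (ls.map PySem.Str.strip)) := by
  induction ls with
  | nil => rfl
  | cons l ls ih =>
    by_cases h : PySem.Str.startswith (PySem.Str.strip l) "%" = true
    · simp only [pvLoopA, pvAltDrop, List.map, if_pos h, pvAltTake, pvLoopA_true]
    · simp only [pvLoopA, pvAltDrop, List.map, if_neg h]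
      simp [ih]

-- ===== VERDICT (by name: the statement is the Claim_ definition above) =====
theorem extract_help_text_py_spec : Claim_equal_extract_help_text_py := by
  intro fb _
  show _ = _
  simp only [extract_help_text_py, extract_help_text_py_alt, pvLoopA_false]
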